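-- pv_equiv track=rewrite | github.com/keelson-ai/keelson | src/pentis/core/templates.py | _extract_blockquote
-- ===== SOURCE A (Python) =====
-- def _extract_blockquote(text: str) -> str:
--     """Extract blockquoted content (lines starting with >) from text."""
--     lines = text.split("\n")
--     quote_lines: list[str] = []
--     in_quote = False
--     for line in lines:
--         stripped = line.strip()
--         if stripped.startswith(">"):
--             in_quote = True
--             # Remove the leading > and optional space
--             content = stripped[1:]
--             if content.startswith(" "):
--                 content = content[1:]
--             quote_lines.append(content)
--         elif in_quote and stripped == "":
--             # Blank line inside a multi-line blockquote — keep it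
--             quote_lines.append("")
--         elif in_quote:
--             # Non-quote line after quote started — end of blockquote
--             break
--     # Strip trailing blank lines
--     while quote_lines and quote_lines[-1] == "":
--         quote_lines.pop()
--     return "\n".join(quote_lines)
-- ===== SOURCE B (Python) =====
-- def _extract_blockquote(text: str) -> str:
--     """Extract blockquoted content (lines starting with >) from text."""
--     stripped = [ln.strip() for ln in text.split("\n")]
--     n = len(stripped)
--     # locate the first quote line (n if there is none)
--     start = next((i for i, s in enumerate(stripped) if s.startswith(">")), n)
--     # extend over the contiguous run of quote lines and blank lines
--     stop = start
--     while stop < n and (stripped[stop].startswith(">") or stripped[stop] == ""):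
--         stop += 1
--     cleaned = [s[2:] if s.startswith("> ") else s[1:] if s.startswith(">") else ""
--                for s in stripped[start:stop]]
--     while cleaned and cleaned[-1] == "":
--         cleaned.pop()
--     return "\n".join(cleaned)
-- ===== Notes on version B (the rewrite author's own statement) =====
-- stated objective: simpler
-- what changed: Replaced the stateful in_quote flag loop with break by a locate/extend/clean pipeline: find the index of the first quote line, extend an index over the contiguous quote-or-blank run, clean that slice with a comprehension, then trim trailing blanks and join.
import Mathlib
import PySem

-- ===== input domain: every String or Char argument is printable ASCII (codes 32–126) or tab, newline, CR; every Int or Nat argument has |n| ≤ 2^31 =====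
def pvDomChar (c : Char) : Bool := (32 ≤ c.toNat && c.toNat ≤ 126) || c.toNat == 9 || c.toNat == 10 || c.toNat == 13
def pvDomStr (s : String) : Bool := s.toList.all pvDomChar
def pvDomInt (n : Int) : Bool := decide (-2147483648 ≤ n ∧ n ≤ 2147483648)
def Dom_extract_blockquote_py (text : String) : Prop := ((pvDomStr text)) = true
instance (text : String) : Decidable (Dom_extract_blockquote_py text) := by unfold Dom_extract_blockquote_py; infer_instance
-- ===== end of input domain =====

-- B replaces A's stateful in_quote flag loop by a locate/extend/clean-slice pipeline (same cost, simpler phases).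

-- ===== PORT A =====
-- A's trailing 'while quote_lines and quote_lines[-1] == "": pop()' loop (B's Python has the
-- literally identical trim loop, so both ports share this transliteration).
def popTrailingBlanks (l : List String) : List String :=
  match h : l.getLast? with
  | some "" => popTrailingBlanks l.dropLast
  | _ => l
termination_by l.length
decreasing_by
  have hne : l ≠ [] := by intro e; subst e; simp at h
  have := List.length_pos_iff.mpr hne
  simp [List.length_dropLast]; omega

-- A's for-loop over lines with the in_quote flag and the break (break = returning []).
def aLoop : List String → Bool → List String
  | [], _ => []
  | line :: rest, inq =>
    let stripped := PySem.Str.strip line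
    if PySem.Str.startswith stripped ">" then
      let content := PySem.Str.slice stripped (some 1)
      let content := if PySem.Str.startswith content " " then PySem.Str.slice content (some 1) else content
      content :: aLoop rest true
    else if inq && (stripped == "") then
      "" :: aLoop rest inq
    else if inq then
      []
    else aLoop rest inq

def extract_blockquote_py (text : String) : String :=
  let lines := (PySem.Str.split? text "\n").getD []
  PySem.Str.join "\n" (popTrailingBlanks (aLoop lines false))

-- ===== PORT B =====
def bIsQuote (s : String) : Bool := PySem.Str.startswith s ">"

-- B's 'while stop < n and (...startswith('>') or == ""): stop += 1' scan, as the length it advances by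
def bScan : List String → Nat
  | [] => 0
  | s :: rest => if bIsQuote s || s == "" then bScan rest + 1 else 0

def bClean (s : String) : String :=
  if PySem.Str.startswith s "> " then PySem.Str.slice s (some 2)
  else if PySem.Str.startswith s ">" then PySem.Str.slice s (some 1)
  else ""

def extract_blockquote_py_alt (text : String) : String :=
  let stripped := ((PySem.Str.split? text "\n").getD []).map PySem.Str.strip
  let start := stripped.findIdx bIsQuote
  let stop := start + bScan (stripped.drop start)
  let cleaned := (PySem.List.slice stripped (some (start : Int)) (some (stop : Int))).map bClean
  PySem.Str.join "\n" (popTrailingBlanks cleaned)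

-- ===== PRECONDITION & SPEC =====
def Spec_extract_blockquote_py (text : String) (out : String) : Prop := out = extract_blockquote_py_alt text
instance (text : String) (out : String) : Decidable (Spec_extract_blockquote_py text out) := by unfold Spec_extract_blockquote_py; infer_instance

-- ===== CLAIM (what is proved, stated in full; the proofs are below) =====
def Claim_equal_extract_blockquote_py : Prop := ∀ (text : String), Dom_extract_blockquote_py text → Spec_extract_blockquote_py text (extract_blockquote_py text)

-- ===== LEMMAS AND PROOFS =====

-- A's per-line cleaning equals bClean on a line that starts with ">".
theorem clean_eq (s : String) (hq : PySem.Str.startswith s ">" = true) :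
    (let content := PySem.Str.slice s (some 1);
     if PySem.Str.startswith content " " then PySem.Str.slice content (some 1) else content)
      = bClean s := by
  obtain ⟨t, ht⟩ : ∃ t, s.toList = '>' :: t := by
    have := (PySem.Chars.startswith_iff (s := s.toList) (p := ">".toList)).mp (by simpa using hq)
    obtain ⟨u, hu⟩ := this
    exact ⟨u, by simpa using hu.symm⟩
  have hsl : ∀ (r : String) (k : Int), 0 ≤ k →
      (PySem.Str.slice r (some k)).toList = r.toList.drop k.toNat := by
    intro r k hk
    simp [PySem.List.slice_from _ hk]
  have h1 : (PySem.Str.slice s (some 1)).toList = t := by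
    rw [hsl s 1 (by norm_num), ht]; rfl
  have h2 : PySem.Str.startswith (PySem.Str.slice s (some 1)) " "
      = PySem.Str.startswith s "> " := by
    simp only [PySem.Str.startswith_eq, h1, ht]
    simp [PySem.Chars.startswith]
  show (if PySem.Str.startswith (PySem.Str.slice s (some 1)) " " = true
        then PySem.Str.slice (PySem.Str.slice s (some 1)) (some 1)
        else PySem.Str.slice s (some 1)) = bClean s
  unfold bClean
  rw [h2]
  by_cases hsp : PySem.Str.startswith s "> " = true
  · rw [if_pos hsp, if_pos hsp]
    apply String.toList_inj.mp
    rw [hsl _ 1 (by norm_num), hsl _ 2 (by norm_num), h1, ht]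
    rfl
  · rw [if_neg hsp, if_neg hsp, if_pos hq]

-- once in_quote, A's loop collects exactly the cleaned quote-or-blank prefix
theorem aLoop_true (lines : List String) :
    aLoop lines true
      = (((lines.map PySem.Str.strip).take (bScan (lines.map PySem.Str.strip))).map bClean) := by
  induction lines with
  | nil => simp [aLoop, bScan]
  | cons line rest ih =>
    simp only [aLoop, List.map_cons]
    by_cases hq : PySem.Str.startswith (PySem.Str.strip line) ">" = true
    · rw [if_pos hq]
      have : bIsQuote (PySem.Str.strip line) = true := hq
      simp only [bScan, this, Bool.true_or, if_pos, List.take_succ_cons, List.map_cons]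
      rw [ih, clean_eq _ hq]
    · rw [if_neg hq]
      by_cases hb : PySem.Str.strip line = ""
      · have hbq : (PySem.Str.strip line == "") = true := by simp [hb]
        simp only [Bool.true_and, hbq, if_pos]
        have hpred : (bIsQuote (PySem.Str.strip line) || PySem.Str.strip line == "") = true := by
          simp [hbq]
        simp only [bScan, hpred, if_pos, List.take_succ_cons, List.map_cons]
        rw [ih]
        congr 1
        simp [bClean, hb, PySem.Str.startswith_eq, PySem.Chars.startswith]
      · have hbq2 : bIsQuote (PySem.Str.strip line) = false := by simpa [bIsQuote] using hq
        simp [hbq2, bScan, hb]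

-- before the first quote line, A's loop skips; B drops the same prefix via findIdx
theorem aLoop_false (lines : List String) :
    aLoop lines false
      = (let ss := lines.map PySem.Str.strip;
         ((ss.drop (ss.findIdx bIsQuote)).take (bScan (ss.drop (ss.findIdx bIsQuote)))).map bClean) := by
  induction lines with
  | nil => simp [aLoop, bScan]
  | cons line rest ih =>
    simp only [aLoop, List.map_cons]
    by_cases hq : PySem.Str.startswith (PySem.Str.strip line) ">" = true
    · rw [if_pos hq]
      have hbq : bIsQuote (PySem.Str.strip line) = true := hq
      rw [List.findIdx_cons, hbq]
      simp only [cond_true, List.drop_zero]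
      have : bScan (PySem.Str.strip line :: rest.map PySem.Str.strip)
           = bScan (rest.map PySem.Str.strip) + 1 := by simp [bScan, hbq]
      rw [this]
      simp only [List.take_succ_cons, List.map_cons]
      rw [aLoop_true, clean_eq _ hq]
    · rw [if_neg hq]
      have hbq : bIsQuote (PySem.Str.strip line) = false := by simpa [bIsQuote] using hq
      rw [List.findIdx_cons, hbq]
      simp only [Bool.false_and, Bool.false_eq_true, if_false, cond_false, List.drop_succ_cons]
      exact ih

-- B's Int slice is a drop/take of the stripped lines
theorem slice_take (ss : List String) (a n : Nat) :
    PySem.List.slice ss (some (a : Int)) (some ((a + n : Nat) : Int)) = (ss.drop a).take n := by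
  rw [PySem.List.slice_natCast]
  congr 1
  omega

-- ===== VERDICT (by name: the statement is the Claim_ definition above) =====
theorem extract_blockquote_py_spec : Claim_equal_extract_blockquote_py := by
  intro text _
  unfold Spec_extract_blockquote_py extract_blockquote_py extract_blockquote_py_alt
  simp only []
  rw [aLoop_false, slice_take]
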